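-- pv_equiv track=rewrite | github.com/rooz-live/agentic-flow | src/hivelocity/device_manager.py | validatePartitionScheme
-- ===== SOURCE A (Python) =====
-- from typing import Dict, List
--
-- def validatePartitionScheme(partition_scheme: List[Dict[str, str]]) -> bool:
--     """
--     Validates the partition scheme.
--     Rules:
--     1. Must list partitions.
--     2. Root partition (/) must be present.
--     3. Sizes must be positive integers or 'rest'.
--     4. Check for duplicate mount types.
--     """
--     if not partition_scheme:
--         return False
--
--     has_root = False
--     mount_points = set()
--
--     for partition in partition_scheme:
--         mount_point = partition.get("mount_point")
--         size = partition.get("size")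
--
--         if not mount_point or not size:
--             return False
--
--         if mount_point in mount_points:
--             return False
--         mount_points.add(mount_point)
--
--         if mount_point == "/":
--             has_root = True
--
--         if isinstance(size, int):
--             if size <= 0:
--                 return False
--         elif isinstance(size, str):
--             if size != "rest":
--                 return False
--         else:
--             return False
--
--     return has_root
-- ===== SOURCE B (Python) =====
-- def validatePartitionScheme(partition_scheme):
--     if not partition_scheme:
--         return False
--
--     def _valid(partition):
--         mount_point = partition.get("mount_point")
--         size = partition.get("size")
--         if not mount_point or not size:
--             return False
--         if isinstance(size, int):
--             return size > 0
--         if isinstance(size, str):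
--             return size == "rest"
--         return False
--
--     mounts = [p.get("mount_point") for p in partition_scheme]
--     return (len(set(mounts)) == len(mounts)
--             and all(_valid(p) for p in partition_scheme)
--             and any(p.get("mount_point") == "/" for p in partition_scheme))
-- ===== Notes on version B (the rewrite author's own statement) =====
-- stated objective: simpler
-- what changed: Replaced the single stateful early-return loop (has_root flag plus a growing seen-set) with three independent declarative passes - all partitions valid, mount points duplicate-free via len(set(...)), and root present via any(...) - combined by one conjunction.
import Mathlib
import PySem

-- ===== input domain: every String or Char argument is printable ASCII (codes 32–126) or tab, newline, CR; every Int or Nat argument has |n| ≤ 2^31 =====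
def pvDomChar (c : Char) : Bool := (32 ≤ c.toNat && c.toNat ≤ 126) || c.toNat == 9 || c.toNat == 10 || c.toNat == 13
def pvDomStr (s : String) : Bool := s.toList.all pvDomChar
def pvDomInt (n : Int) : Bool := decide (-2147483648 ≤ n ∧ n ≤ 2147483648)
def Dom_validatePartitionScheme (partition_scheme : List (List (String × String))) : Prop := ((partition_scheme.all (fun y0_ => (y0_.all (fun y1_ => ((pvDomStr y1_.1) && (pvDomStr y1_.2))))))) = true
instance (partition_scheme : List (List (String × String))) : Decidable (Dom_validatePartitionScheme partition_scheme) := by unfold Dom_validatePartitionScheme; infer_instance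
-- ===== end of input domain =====

-- B replaces A's stateful early-return loop by three independent passes (all valid /
-- no duplicate mount points via set / root present) joined by one conjunction (simpler).
-- Under the dict[str,str] type convention sizes are strings, so A's isinstance(size, int)
-- branch is unreachable and only the string branch is ported.

-- ===== PORT A =====
-- the for-loop of A, carrying its two pieces of state (has_root, mount_points)
def pvLoopA (ps : List (List (String × String))) (has_root : Bool)
    (mount_points : PySem.Set String) : Bool :=
  match ps with
  | [] => has_root
  | partition :: rest =>
    let mount_point := (PySem.Dict.mk partition).get? "mount_point"
    let size := (PySem.Dict.mk partition).get? "size"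
    -- `not mount_point or not size` : falsy = missing key (None) or empty string
    if mount_point.getD "" = "" || size.getD "" = "" then false
    else
      let mp := mount_point.getD ""
      if mount_points.contains mp then false
      else
        let mount_points := mount_points.add mp
        let has_root := has_root || (mp = "/")
        -- size is a str here; `if size != "rest": return False`
        if size.getD "" ≠ "rest" then false
        else pvLoopA rest has_root mount_points

def validatePartitionScheme (partition_scheme : List (List (String × String))) : Bool :=
  if partition_scheme = [] then false
  else pvLoopA partition_scheme false PySem.Set.empty

-- ===== PORT B =====
-- Source B's _valid helper
def pvValidB (partition : List (String × String)) : Bool :=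
  let mount_point := (PySem.Dict.mk partition).get? "mount_point"
  let size := (PySem.Dict.mk partition).get? "size"
  if mount_point.getD "" = "" || size.getD "" = "" then false
  else size.getD "" = "rest"

def validatePartitionScheme_alt (partition_scheme : List (List (String × String))) : Bool :=
  if partition_scheme = [] then false
  else
    let mounts := partition_scheme.map (fun p => (PySem.Dict.mk p).get? "mount_point")
    ((PySem.Set.ofList mounts).length = mounts.length)
    && partition_scheme.all pvValidB
    && partition_scheme.any (fun p => (PySem.Dict.mk p).get? "mount_point" = some "/")

-- ===== PRECONDITION & SPEC =====
def Spec_validatePartitionScheme (partition_scheme : List (List (String × String))) (out : Bool) : Prop := out = validatePartitionScheme_alt partition_scheme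
instance (partition_scheme : List (List (String × String))) (out : Bool) : Decidable (Spec_validatePartitionScheme partition_scheme out) := by unfold Spec_validatePartitionScheme; infer_instance

-- ===== CLAIM (what is proved, stated in full; the proofs are below) =====
def Claim_equal_validatePartitionScheme : Prop := ∀ (partition_scheme : List (List (String × String))), Dom_validatePartitionScheme partition_scheme → Spec_validatePartitionScheme partition_scheme (validatePartitionScheme partition_scheme)

-- ===== LEMMAS AND PROOFS =====

-- the mount_point key (kept as an Option, as Source B's list holds the raw .get values)
def pvKey (p : List (String × String)) : Option String :=
  (PySem.Dict.mk p).get? "mount_point"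

def pvKeyD (p : List (String × String)) : String := (pvKey p).getD ""

-- freshness/no-duplicate condition A's loop maintains, expressed recursively
def pvNodupFrom (m : PySem.Set String) (ps : List (List (String × String))) : Bool :=
  match ps with
  | [] => true
  | p :: rest => !(m.contains (pvKeyD p)) && pvNodupFrom (m.add (pvKeyD p)) rest

theorem pvLoopA_eq (ps : List (List (String × String))) (h : Bool) (m : PySem.Set String) :
    pvLoopA ps h m =
      (pvNodupFrom m ps && ps.all pvValidB && (h || ps.any (fun p => pvKeyD p = "/"))) := by
  induction ps generalizing h m with
  | nil => simp [pvLoopA, pvNodupFrom]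
  | cons p rest ih =>
    by_cases h1 : ((PySem.Dict.mk p).get? "mount_point").getD "" = "" ∨
        ((PySem.Dict.mk p).get? "size").getD "" = ""
    · rcases h1 with h1 | h1 <;>
        simp [pvLoopA, pvNodupFrom, pvValidB, pvKeyD, pvKey, h1]
    · push_neg at h1
      obtain ⟨ha, hb⟩ := h1
      by_cases h2 : ((PySem.Dict.mk p).get? "mount_point").getD "" ∈ m
      · simp [pvLoopA, pvNodupFrom, pvValidB, pvKeyD, pvKey, ha, hb, h2]
      · have hc : m.contains (((PySem.Dict.mk p).get? "mount_point").getD "") = false := by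
          by_contra hcc
          simp only [Bool.not_eq_false] at hcc
          exact h2 ((PySem.Set.contains_iff m _).1 hcc)
        by_cases h3 : ((PySem.Dict.mk p).get? "size").getD "" = "rest"
        · have hv : pvValidB p = true := by simp [pvValidB, ha, hb, h3]
          simp only [pvLoopA, pvNodupFrom, List.all_cons, List.any_cons, hv]
          simp [ha, hb, h2, h3, hv, hc, ih, pvKeyD, pvKey, Bool.or_assoc, Bool.and_assoc]
          all_goals rfl
        · simp [pvLoopA, pvNodupFrom, pvValidB, pvKeyD, pvKey, ha, hb, h2, h3]

theorem pvNodupFrom_iff (ps : List (List (String × String))) (m : PySem.Set String) :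
    pvNodupFrom m ps = true ↔
      (ps.map pvKeyD).Nodup ∧ ∀ x ∈ ps.map pvKeyD, x ∉ m := by
  induction ps generalizing m with
  | nil => simp [pvNodupFrom]
  | cons p rest ih =>
    simp only [pvNodupFrom, Bool.and_eq_true, Bool.not_eq_eq_eq_not, Bool.not_true,
      List.map_cons, List.nodup_cons, List.mem_cons, ih]
    constructor
    · rintro ⟨hc, hnd, hfresh⟩
      have hc' : pvKeyD p ∉ m := fun hmem => by
        rw [(PySem.Set.contains_iff m _).2 hmem] at hc; cases hc
      refine ⟨⟨fun hmem => ?_, hnd⟩, ?_⟩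
      · exact (hfresh _ hmem) ((PySem.Set.mem_add _ _ _).2 (Or.inr rfl))
      · rintro x (rfl | hx)
        · exact hc'
        · intro hxm; exact (hfresh x hx) ((PySem.Set.mem_add m _ _).2 (Or.inl hxm))
    · rintro ⟨⟨hne, hnd⟩, hfresh⟩
      have hc : m.contains (pvKeyD p) = false := by
        by_contra hcc
        simp only [Bool.not_eq_false] at hcc
        exact hfresh (pvKeyD p) (Or.inl rfl) ((PySem.Set.contains_iff m _).1 hcc)
      refine ⟨hc, hnd, ?_⟩
      intro x hx hxadd
      rcases (PySem.Set.mem_add m _ _).1 hxadd with hxm | hxe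
      · exact hfresh x (Or.inr hx) hxm
      · exact hne (hxe ▸ hx)

-- length of a Set.add fold: equals s.length + l.length iff l is fresh and duplicate-free
theorem pvFoldAddLen {α : Type} [BEq α] [LawfulBEq α] (l : List α) (s : PySem.Set α) :
    ((List.foldl PySem.Set.add s l).length = s.length + l.length) ↔
      (l.Nodup ∧ ∀ x ∈ l, x ∉ s) := by
  induction l generalizing s with
  | nil => simp
  | cons x l ih =>
    have hle : ∀ (t : PySem.Set α), (List.foldl PySem.Set.add t l).length ≤ t.length + l.length := by
      clear ih
      induction l with
      | nil => intro t; simp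
      | cons y l ih2 =>
        intro t
        have h1 : (t.add y).length ≤ t.length + 1 := by
          by_cases hy : y ∈ t <;> simp [PySem.Set.add, hy]
        calc (List.foldl PySem.Set.add (t.add y) l).length
            ≤ (t.add y).length + l.length := ih2 (t.add y)
          _ ≤ t.length + (y :: l).length := by simp only [List.length_cons]; omega
    simp only [List.foldl_cons, List.nodup_cons, List.mem_cons]
    by_cases hx : x ∈ s
    · have hadd : s.add x = s := by simp [PySem.Set.add, hx]
      rw [hadd]
      constructor
      · intro heq
        have hb := hle s
        rw [heq] at hb
        simp only [List.length_cons] at hb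
        omega
      · rintro ⟨-, hfresh⟩
        exact absurd hx (hfresh x (Or.inl rfl))
    · have hlen : (s.add x).length = s.length + 1 := by simp [PySem.Set.add, hx]
      rw [show s.length + (x :: l).length = (s.add x).length + l.length by
        rw [hlen, List.length_cons]; omega]
      rw [ih]
      constructor
      · rintro ⟨hnd, hfresh⟩
        refine ⟨⟨fun hmem => ?_, hnd⟩, ?_⟩
        · exact (hfresh x hmem) ((PySem.Set.mem_add _ _ _).2 (Or.inr rfl))
        · rintro y (rfl | hy)
          · exact hx
          · intro hym; exact (hfresh y hy) ((PySem.Set.mem_add s x y).2 (Or.inl hym))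
      · rintro ⟨⟨hne, hnd⟩, hfresh⟩
        refine ⟨hnd, ?_⟩
        intro y hy hyadd
        rcases (PySem.Set.mem_add s x y).1 hyadd with hym | hye
        · exact hfresh y (Or.inr hy) hym
        · exact hne (hye ▸ hy)

theorem pvOfListLen {α : Type} [BEq α] [LawfulBEq α] (l : List α) :
    ((PySem.Set.ofList l).length = l.length) ↔ l.Nodup := by
  rw [PySem.Set.ofList_eq_foldl]
  have h := pvFoldAddLen l (PySem.Set.empty (α := α))
  simpa [PySem.Set.empty] using h

theorem pvValid_key {p : List (String × String)} (h : pvValidB p = true) :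
    pvKey p = some (pvKeyD p) := by
  unfold pvValidB at h
  by_cases h1 : ((PySem.Dict.mk p).get? "mount_point").getD "" = "" ∨
      ((PySem.Dict.mk p).get? "size").getD "" = ""
  · simp [if_pos (by simpa using h1)] at h
  · push_neg at h1
    unfold pvKey pvKeyD pvKey
    cases hk : (PySem.Dict.mk p).get? "mount_point" with
    | none => exact absurd (by simp [hk]) h1.1
    | some s => simp

theorem pvKey_root (p : List (String × String)) :
    (decide (pvKeyD p = "/")) = (decide (pvKey p = some "/")) := by
  unfold pvKeyD
  cases hk : pvKey p with
  | none => simp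
  | some s => simp

theorem pvAnyRoot (ps : List (List (String × String))) :
    (ps.any fun p => decide (pvKeyD p = "/")) =
      ps.any fun p => decide ((PySem.Dict.mk p).get? "mount_point" = some "/") := by
  induction ps with
  | nil => rfl
  | cons p rest ih =>
    simp only [List.any_cons, ih, pvKey_root p, pvKey]
    rfl

theorem validatePartitionScheme_eq (ps : List (List (String × String))) :
    validatePartitionScheme ps = validatePartitionScheme_alt ps := by
  by_cases hnil : ps = []
  · subst hnil; rfl
  · unfold validatePartitionScheme validatePartitionScheme_alt
    rw [if_neg hnil, if_neg hnil, pvLoopA_eq, Bool.false_or, pvAnyRoot]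
    by_cases hall : ps.all pvValidB = true
    · -- all valid: every key is `some _`, so the two duplicate tests agree
      have hkeys : ps.map (fun p => (PySem.Dict.mk p).get? "mount_point") =
          (ps.map pvKeyD).map some := by
        rw [List.map_map]
        refine List.map_congr_left (fun p hp => ?_)
        have := pvValid_key (by rw [List.all_eq_true] at hall; exact hall p hp)
        simpa [pvKey] using this
      have hnodup : pvNodupFrom PySem.Set.empty ps =
          decide ((PySem.Set.ofList (ps.map fun p => (PySem.Dict.mk p).get? "mount_point")).length
            = (ps.map fun p => (PySem.Dict.mk p).get? "mount_point").length) := by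
        rw [Bool.eq_iff_iff, decide_eq_true_eq, pvNodupFrom_iff, hkeys, pvOfListLen]
        constructor
        · rintro ⟨hnd, -⟩
          exact (List.nodup_map_iff (Option.some_injective String)).mpr hnd
        · intro hnd
          exact ⟨(List.nodup_map_iff (Option.some_injective String)).mp hnd,
            by simp [PySem.Set.empty]⟩
      rw [hnodup, hall]
    · simp only [Bool.not_eq_true] at hall
      simp [hall]

-- ===== VERDICT (by name: the statement is the Claim_ definition above) =====
theorem validatePartitionScheme_spec : Claim_equal_validatePartitionScheme := by
  intro ps _
  exact validatePartitionScheme_eq ps
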